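-- pv_equiv track=rewrite | github.com/mbartnicki80/WDI | wdikolokwia/zad4.py | solve
-- ===== SOURCE A (Python) =====
-- def zgodne(l1, l2):
--
--     tab1 = [0 for i in range(4)]
--
--     while l1>0:
--         tab1[l1%4]=1
--         l1 //= 4
--
--     while l2>0:
--         if tab1[l2%4]==0:
--             return False
--         l2 //= 4
--
--     return True
--
-- def solve(tab):
--
--     n = len(tab)
--     maksi = 1
--     for i in range(n):
--         dlugosc = 1
--         for j in range(i+1, n):
--             if zgodne(tab[i], tab[j]):
--                 dlugosc += 1
--         maksi = max(maksi, dlugosc)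
--
--     return maksi
-- ===== SOURCE B (Python) =====
-- def solve(tab):
--     # reverse scan with a frequency table of 4-bit digit masks; submask sum replaces the inner scan
--     best = 1
--     freq = {}
--     for x in reversed(tab):
--         m = 0
--         v = x
--         while v > 0:
--             m |= 1 << (v % 4)
--             v //= 4
--         c = 0
--         for s in range(16):
--             if s & m == s:
--                 c += freq.get(s, 0)
--         best = max(best, 1 + c)
--         freq[m] = freq.get(m, 0) + 1
--     return best
-- ===== Notes on version B (the rewrite author's own statement) =====
-- stated objective: faster
-- what changed: Replaces A's quadratic all-pairs zgodne scan (re-deriving both numbers' base-4 digit sets per pair) by a single reverse pass that computes each number's 4-bit digit mask once and counts compatible later elements by summing a 16-entry frequency table over the submasks of the current mask.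
import Mathlib
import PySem

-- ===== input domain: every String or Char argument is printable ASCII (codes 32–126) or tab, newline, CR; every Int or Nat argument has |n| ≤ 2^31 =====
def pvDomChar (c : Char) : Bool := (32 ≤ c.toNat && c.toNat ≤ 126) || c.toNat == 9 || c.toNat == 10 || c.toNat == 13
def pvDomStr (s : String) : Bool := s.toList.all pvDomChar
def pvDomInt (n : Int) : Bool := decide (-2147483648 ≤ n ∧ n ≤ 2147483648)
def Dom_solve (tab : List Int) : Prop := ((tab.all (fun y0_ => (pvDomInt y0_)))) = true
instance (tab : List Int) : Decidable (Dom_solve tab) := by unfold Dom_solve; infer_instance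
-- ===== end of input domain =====

-- B replaces A's quadratic pairwise scan by one reverse pass over a frequency table of 4-bit
-- base-4 digit masks, summing over the 16 submasks (objective: faster).

-- ===== PORT A =====
-- while l1 > 0: tab1[l1%4] = 1; l1 //= 4   (the index l1%4 is in 0..3, so List.set with .toNat is exact)
def zgodneLoop1 (l1 : Int) (tab1 : List Int) : List Int :=
  if l1 > 0 then
    zgodneLoop1 (PySem.Int.floordiv l1 4) (tab1.set (PySem.Int.mod l1 4).toNat 1)
  else tab1
termination_by l1.toNat
decreasing_by rw [PySem.Int.floordiv_eq_ediv_of_pos (by omega : (0:Int) < 4)]; omega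

-- while l2 > 0: if tab1[l2%4] == 0: return False; l2 //= 4   (index in range; pyGetD is exact here)
def zgodneLoop2 (l2 : Int) (tab1 : List Int) : Bool :=
  if l2 > 0 then
    if PySem.List.pyGetD tab1 (PySem.Int.mod l2 4) 0 == 0 then false
    else zgodneLoop2 (PySem.Int.floordiv l2 4) tab1
  else true
termination_by l2.toNat
decreasing_by rw [PySem.Int.floordiv_eq_ediv_of_pos (by omega : (0:Int) < 4)]; omega

def zgodne (l1 l2 : Int) : Bool :=
  zgodneLoop2 l2 (zgodneLoop1 l1 (List.replicate 4 0))

def solve (tab : List Int) : Int :=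
  (PySem.List.pyRange 0 (tab.length : Int) 1).foldl
    (fun maksi i =>
      max maksi
        ((PySem.List.pyRange (i + 1) (tab.length : Int) 1).foldl
          (fun dlugosc j =>
            if zgodne (PySem.List.pyGetD tab i 0) (PySem.List.pyGetD tab j 0) then dlugosc + 1
            else dlugosc) 1))
    1

-- ===== PORT B =====
-- m |= 1 << (v % 4); v //= 4   (the shift amount v%4 is in 0..3, so .toNat is exact)
def maskLoopB (v m : Int) : Int :=
  if v > 0 then
    maskLoopB (PySem.Int.floordiv v 4) (PySem.Int.bor m ((1 : Int) <<< (PySem.Int.mod v 4).toNat))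
  else m
termination_by v.toNat
decreasing_by rw [PySem.Int.floordiv_eq_ediv_of_pos (by omega : (0:Int) < 4)]; omega

-- c = sum over s in range(16) with s & m == s of freq.get(s, 0)
def subSum (freq : PySem.Dict Int Int) (m : Int) : Int :=
  (PySem.List.pyRange 0 16 1).foldl
    (fun c s => if PySem.Int.band s m == s then c + freq.getD s 0 else c) 0

def solve_alt (tab : List Int) : Int :=
  (tab.reverse.foldl
    (fun (st : Int × PySem.Dict Int Int) x =>
      let m := maskLoopB x 0
      (max st.1 (1 + subSum st.2 m), st.2.insert m (st.2.getD m 0 + 1)))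
    (1, PySem.Dict.empty)).1

-- ===== PRECONDITION & SPEC =====
def Spec_solve (tab : List Int) (out : Int) : Prop := out = solve_alt tab
instance (tab : List Int) (out : Int) : Decidable (Spec_solve tab out) := by unfold Spec_solve; infer_instance

-- ===== CLAIM (what is proved, stated in full; the proofs are below) =====
def Claim_equal_solve : Prop := ∀ (tab : List Int), Dom_solve tab → Spec_solve tab (solve tab)

-- ===== LEMMAS AND PROOFS =====

-- induction scheme for the base-4 digit-stripping loops
theorem posRec {P : Int → Prop} (h0 : ∀ v : Int, ¬ v > 0 → P v)
    (h1 : ∀ v : Int, v > 0 → P (PySem.Int.floordiv v 4) → P v) (v : Int) : P v :=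
  if h : v > 0 then h1 v h (posRec h0 h1 (PySem.Int.floordiv v 4)) else h0 v h
termination_by v.toNat
decreasing_by rw [PySem.Int.floordiv_eq_ediv_of_pos (by omega : (0:Int) < 4)]; omega

-- the set of base-4 digits of v, as a Nat bitmask, reference version
def maskNat (v : Int) (m : Nat) : Nat :=
  if v > 0 then maskNat (PySem.Int.floordiv v 4) (m ||| (1 <<< (PySem.Int.mod v 4).toNat)) else m
termination_by v.toNat
decreasing_by rw [PySem.Int.floordiv_eq_ediv_of_pos (by omega : (0:Int) < 4)]; omega

def cntSub (x : Int) (l : List Int) : Int :=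
  (l.countP (fun y => maskNat y 0 &&& maskNat x 0 == maskNat y 0) : Int)

-- the common specification both programs compute
def Mspec : List Int → Int
  | [] => 1
  | x :: l => max (1 + cntSub x l) (Mspec l)

def tabOf (m : Nat) : List Int :=
  [if m.testBit 0 then 1 else 0, if m.testBit 1 then 1 else 0,
   if m.testBit 2 then 1 else 0, if m.testBit 3 then 1 else 0]

theorem digit_lt4 (v : Int) : (PySem.Int.mod v 4).toNat < 4 := by
  have h1 := PySem.Int.mod_nonneg v (by omega : (0:Int) < 4)
  have h2 := PySem.Int.mod_lt v (by omega : (0:Int) < 4)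
  omega

theorem or16 : ∀ m < 16, ∀ d < 4, m ||| (1 <<< d) < 16 := by decide

theorem maskNat_lt16 (v : Int) : ∀ m, m < 16 → maskNat v m < 16 := by
  induction v using posRec with
  | h0 v h => intro m hm; rw [maskNat, if_neg h]; exact hm
  | h1 v h ih =>
    intro m hm; rw [maskNat, if_pos h]
    exact ih _ (or16 m hm _ (digit_lt4 v))

theorem maskNat_acc (v : Int) : ∀ m, maskNat v m = maskNat v 0 ||| m := by
  induction v using posRec with
  | h0 v h => intro m; rw [maskNat, if_neg h, maskNat, if_neg h]; simp
  | h1 v h ih =>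
    intro m
    rw [maskNat, if_pos h, ih]
    conv_rhs => rw [maskNat, if_pos h, ih]
    simp [Nat.or_comm, Nat.or_left_comm]

theorem set_tabOf : ∀ m < 16, ∀ d < 4, (tabOf m).set d 1 = tabOf (m ||| (1 <<< d)) := by decide

theorem getD_tabOf : ∀ m < 16, ∀ d < 4,
    (tabOf m).getD d 0 = if m.testBit d then 1 else 0 := by decide

theorem zgodneLoop1_tabOf (v : Int) : ∀ m, m < 16 → zgodneLoop1 v (tabOf m) = tabOf (maskNat v m) := by
  induction v using posRec with
  | h0 v h => intro m hm; rw [zgodneLoop1, if_neg h, maskNat, if_neg h]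
  | h1 v h ih =>
    intro m hm
    rw [zgodneLoop1, if_pos h, maskNat, if_pos h,
        set_tabOf m hm _ (digit_lt4 v)]
    exact ih _ (or16 m hm _ (digit_lt4 v))

theorem sub_or : ∀ a < 16, ∀ m < 16, ∀ d < 4,
    ((a ||| 1 <<< d) &&& m == a ||| 1 <<< d) = (m.testBit d && (a &&& m == a)) := by decide

theorem zgodneLoop2_eq (v : Int) : ∀ m : Nat, m < 16 →
    zgodneLoop2 v (tabOf m) = (maskNat v 0 &&& m == maskNat v 0) := by
  induction v using posRec with
  | h0 v h =>
    intro m hm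
    rw [zgodneLoop2, if_neg h, maskNat, if_neg h]
    simp [Nat.zero_and]
  | h1 v h ih =>
    intro m hm
    have hd := digit_lt4 v
    have hmod : PySem.Int.mod v 4 = ((PySem.Int.mod v 4).toNat : Int) :=
      (Int.toNat_of_nonneg (PySem.Int.mod_nonneg v (by omega))).symm
    rw [zgodneLoop2, if_pos h, hmod, PySem.List.pyGetD_natCast,
        getD_tabOf m hm _ hd]
    have hacc : maskNat v 0 = maskNat (PySem.Int.floordiv v 4) 0 ||| 1 <<< (PySem.Int.mod v 4).toNat := by
      rw [maskNat, if_pos h, maskNat_acc]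
      simp
    rw [hacc, sub_or _ (maskNat_lt16 _ 0 (by omega)) m hm _ hd, ← ih m hm]
    by_cases ht : m.testBit (PySem.Int.mod v 4).toNat <;> simp [ht]


theorem zgodne_eq (x y : Int) :
    zgodne x y = (maskNat y 0 &&& maskNat x 0 == maskNat y 0) := by
  have h0 : List.replicate 4 (0:Int) = tabOf 0 := by decide
  rw [zgodne, h0, zgodneLoop1_tabOf x 0 (by omega),
      zgodneLoop2_eq y _ (maskNat_lt16 x 0 (by omega))]

-- ===== A-side: solve computes Mspec =====

def goA : List Int → Int → Int
  | [], acc => acc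
  | x :: l, acc => goA l (max acc (l.foldl (fun d y => if zgodne x y then d + 1 else d) 1))

theorem solve_outer (tab : List Int) : ∀ (k : Nat) (acc : Int), k ≤ tab.length →
    (PySem.List.pyRange (k : Int) (tab.length : Int) 1).foldl
      (fun maksi i =>
        max maksi
          ((PySem.List.pyRange (i + 1) (tab.length : Int) 1).foldl
            (fun dlugosc j =>
              if zgodne (PySem.List.pyGetD tab i 0) (PySem.List.pyGetD tab j 0) then dlugosc + 1
              else dlugosc) 1))
      acc = goA (tab.drop k) acc := by
  intro k
  induction hn : tab.length - k generalizing k with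
  | zero =>
    intro acc hk
    have hk' : k = tab.length := by omega
    rw [PySem.List.pyRange_one_eq_nil (by exact_mod_cast Nat.le_of_eq hk'.symm)]
    rw [List.drop_of_length_le (by omega)]
    rfl
  | succ n ih =>
    intro acc hk
    have hklt : k < tab.length := by omega
    rw [PySem.List.pyRange_one_cons (by exact_mod_cast hklt)]
    simp only [List.foldl_cons]
    have hcast : ((k : Int) + 1) = ((k + 1 : Nat) : Int) := by push_cast; ring
    have hinner :
        (PySem.List.pyRange ((k : Int) + 1) (tab.length : Int) 1).foldl
          (fun dlugosc j =>
            if zgodne (PySem.List.pyGetD tab (k : Int) 0) (PySem.List.pyGetD tab j 0) then dlugosc + 1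
            else dlugosc) (1 : Int)
        = (tab.drop (((k : Int) + 1).toNat)).foldl
            (fun d y => if zgodne (PySem.List.pyGetD tab (k : Int) 0) y then d + 1 else d) (1 : Int) :=
      PySem.List.foldl_pyRange_pyGetD' tab 0
            (fun d y => if zgodne (PySem.List.pyGetD tab (k : Int) 0) y then d + 1 else d) (1 : Int)
            (by omega : (0:Int) ≤ (k : Int) + 1)
    have htn : ((k : Int) + 1).toNat = k + 1 := by omega
    rw [htn] at hinner
    have hget : PySem.List.pyGetD tab (k : Int) 0 = tab[k] := by
      rw [PySem.List.pyGetD_natCast, List.getD_eq_getElem?_getD, List.getElem?_eq_getElem hklt]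
      rfl
    have hdrop : tab.drop k = tab[k] :: tab.drop (k + 1) := List.drop_eq_getElem_cons hklt
    rw [hinner, hget, hdrop]
    show _ = goA (tab.drop (k+1)) _
    rw [hcast]
    exact ih (k+1) (by omega) _ (by omega)

theorem foldl_cnt (x : Int) (l : List Int) :
    l.foldl (fun d y => if zgodne x y then d + 1 else d) 1 = 1 + cntSub x l := by
  have hcp : List.countP (fun y => zgodne x y) l
      = List.countP (fun y => maskNat y 0 &&& maskNat x 0 == maskNat y 0) l :=
    List.countP_congr (fun y _ => by simp [zgodne_eq])
  rw [PySem.List.foldl_count_if (fun y => zgodne x y) l 1, cntSub, hcp]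

theorem Mspec_ge_one (l : List Int) : 1 ≤ Mspec l := by
  induction l with
  | nil => exact le_refl 1
  | cons x l ih => exact le_trans ih (le_max_right _ _)

theorem goA_eq (l : List Int) : ∀ acc : Int, 1 ≤ acc → goA l acc = max acc (Mspec l) := by
  induction l with
  | nil => intro acc hacc; rw [goA, Mspec]; omega
  | cons x l ih =>
    intro acc hacc
    rw [goA, foldl_cnt, ih _ (le_trans hacc (le_max_left _ _)), Mspec, max_assoc]

theorem solve_eq_Mspec (tab : List Int) : solve tab = Mspec tab := by
  have h := solve_outer tab 0 1 (by omega)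
  rw [solve]
  simp only [Nat.cast_zero] at h
  rw [h, List.drop_zero, goA_eq tab 1 (le_refl 1)]
  exact max_eq_right (Mspec_ge_one tab)

-- ===== B-side: solve_alt computes Mspec =====

theorem maskLoopB_natCast (v : Int) : ∀ m : Nat, maskLoopB v (m : Int) = ((maskNat v m : Nat) : Int) := by
  induction v using posRec with
  | h0 v h => intro m; rw [maskLoopB, if_neg h, maskNat, if_neg h]
  | h1 v h ih =>
    intro m
    have hd := digit_lt4 v
    have hsh : ((1 : Int) <<< (PySem.Int.mod v 4).toNat) = (((1 <<< (PySem.Int.mod v 4).toNat : Nat) : Nat) : Int) := by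
      interval_cases h : (PySem.Int.mod v 4).toNat <;> decide
    rw [maskLoopB, if_pos h, maskNat, if_pos h, hsh, PySem.Int.bor_natCast, ih]

def histD (l : List Int) : PySem.Dict Int Int :=
  l.foldr (fun x d => d.insert (maskLoopB x 0) (d.getD (maskLoopB x 0) 0 + 1)) PySem.Dict.empty

theorem sum_update (L : List Int) (P : Int → Bool) (g : Int → Int) (t : Int)
    (hnd : L.Nodup) (htL : t ∈ L) :
    (L.map (fun s => if P s then (if s = t then g t + 1 else g s) else 0)).sum
      = (L.map (fun s => if P s then g s else 0)).sum + (if P t then 1 else 0) := by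
  induction L with
  | nil => simp at htL
  | cons a L ih =>
    rcases List.nodup_cons.mp hnd with ⟨hna, hndL⟩
    by_cases hat : a = t
    · subst hat
      have hmap : L.map (fun s => if P s then (if s = a then g a + 1 else g s) else 0)
          = L.map (fun s => if P s then g s else 0) := by
        apply List.map_congr_left
        intro s hs
        have : s ≠ a := fun hsa => hna (hsa ▸ hs)
        simp [this]
      simp only [List.map_cons, List.sum_cons, hmap]
      by_cases hP : P a <;> simp [hP] <;> ring
    · have htL' : t ∈ L := by
        rcases List.mem_cons.mp htL with h | h
        · exact absurd h.symm hat
        · exact h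
      simp only [List.map_cons, List.sum_cons, ih hndL htL', if_neg hat]
      ring

theorem foldl_if_to_sum (L : List Int) (P : Int → Bool) (g : Int → Int) :
    L.foldl (fun c s => if P s then c + g s else c) 0
      = (L.map (fun s => if P s then g s else 0)).sum := by
  have hbody : (fun (c : Int) s => if P s then c + g s else c)
      = (fun c s => c + (if P s then g s else 0)) := by
    funext c s
    by_cases h : P s <;> simp [h]
  rw [hbody, PySem.List.foldl_add L (fun s => if P s then g s else 0) 0, zero_add]

theorem subSum_insert (d : PySem.Dict Int Int) (kx k : Nat) (hkx : kx < 16) (_hk : k < 16) :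
    subSum (d.insert (kx : Int) (d.getD (kx : Int) 0 + 1)) (k : Int)
      = subSum d (k : Int) + (if kx &&& k = kx then 1 else 0) := by
  rw [subSum, subSum, foldl_if_to_sum, foldl_if_to_sum]
  have hins : ∀ s : Int,
      (d.insert (kx : Int) (d.getD (kx : Int) 0 + 1)).getD s 0
        = if s = (kx : Int) then d.getD (kx : Int) 0 + 1 else d.getD s 0 := by
    intro s; rw [PySem.Dict.getD_insert]
  have hmapeq :
      (PySem.List.pyRange 0 16 1).map
          (fun s => if PySem.Int.band s (k : Int) == s then (d.insert (kx : Int) (d.getD (kx : Int) 0 + 1)).getD s 0 else 0)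
        = (PySem.List.pyRange 0 16 1).map
          (fun s => if PySem.Int.band s (k : Int) == s then (if s = (kx : Int) then d.getD (kx : Int) 0 + 1 else d.getD s 0) else 0) := by
    apply List.map_congr_left
    intro s _
    rw [hins]
  rw [hmapeq,
      sum_update (PySem.List.pyRange 0 16 1) (fun s => PySem.Int.band s (k : Int) == s)
        (fun s => d.getD s 0) (kx : Int) (PySem.List.nodup_pyRange_one 0 16)
        (PySem.List.mem_pyRange_one.mpr ⟨by omega, by exact_mod_cast hkx⟩)]
  congr 1
  have : (PySem.Int.band (kx : Int) (k : Int) == (kx : Int)) = (kx &&& k == kx) := by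
    rw [PySem.Int.band_natCast]
    by_cases h : kx &&& k = kx <;> simp [h]
  rw [this]
  by_cases h : kx &&& k = kx <;> simp [h]

theorem subSum_empty (k : Int) : subSum PySem.Dict.empty k = 0 := by
  rw [subSum, foldl_if_to_sum]
  have : ∀ s : Int, (if PySem.Int.band s k == s then (PySem.Dict.empty : PySem.Dict Int Int).getD s 0 else 0) = 0 := by
    intro s
    rw [PySem.Dict.getD_empty]
    by_cases h : PySem.Int.band s k == s <;> simp [h]
  rw [List.map_congr_left (fun s _ => this s)]
  simp

theorem subSum_histD (l : List Int) : ∀ k : Nat, k < 16 →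
    subSum (histD l) (k : Int)
      = (l.countP (fun y => maskNat y 0 &&& k == maskNat y 0) : Int) := by
  induction l with
  | nil => intro k hk; simp [histD, subSum_empty]
  | cons x l ih =>
    intro k hk
    have hm0 : maskLoopB x 0 = ((maskNat x 0 : Nat) : Int) := by
      have := maskLoopB_natCast x 0
      simpa using this
    have hstep : histD (x :: l) = (histD l).insert (maskLoopB x 0) ((histD l).getD (maskLoopB x 0) 0 + 1) := rfl
    rw [hstep, hm0,
        subSum_insert (histD l) (maskNat x 0) k (maskNat_lt16 x 0 (by omega)) hk,
        ih k hk, List.countP_cons]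
    by_cases h : maskNat x 0 &&& k = maskNat x 0
    · simp [h]
    · have hb : (maskNat x 0 &&& k == maskNat x 0) = false := by simp [h]
      simp [h, hb]

theorem foldrB (l : List Int) :
    l.foldr
      (fun x (st : Int × PySem.Dict Int Int) =>
        (max st.1 (1 + subSum st.2 (maskLoopB x 0)),
         st.2.insert (maskLoopB x 0) (st.2.getD (maskLoopB x 0) 0 + 1)))
      (1, PySem.Dict.empty)
    = (Mspec l, histD l) := by
  induction l with
  | nil => rfl
  | cons x l ih =>
    rw [List.foldr_cons, ih]
    have hm0 : maskLoopB x 0 = ((maskNat x 0 : Nat) : Int) := by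
      have := maskLoopB_natCast x 0
      simpa using this
    have hfst : max (Mspec l) (1 + subSum (histD l) (maskLoopB x 0)) = Mspec (x :: l) := by
      rw [hm0, subSum_histD l (maskNat x 0) (maskNat_lt16 x 0 (by omega))]
      rw [Mspec, cntSub, max_comm]
    rw [Prod.mk.injEq]
    exact ⟨hfst, rfl⟩

theorem solve_alt_eq_Mspec (tab : List Int) : solve_alt tab = Mspec tab := by
  rw [solve_alt, List.foldl_reverse]
  have h := foldrB tab
  simp only [] at h ⊢
  rw [h]

-- ===== VERDICT (by name: the statement is the Claim_ definition above) =====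
theorem solve_spec : Claim_equal_solve := by
  intro tab _
  unfold Spec_solve
  rw [solve_eq_Mspec, solve_alt_eq_Mspec]
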